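-- pv_equiv track=rewrite | github.com/skonienczwy/Udemy-Courses | The Complete Data Structures and Algorithms in Python/009 - Dictionary Coding Exercises/same_frequency.py | check_same_frequency
-- ===== SOURCE A (Python) =====
-- def check_same_frequency(lis1, list2):
--     frequency = {}
--     frequency2 = {}
--
--     for i in lis1:
--         frequency[i] = frequency.get(i, 0)+1
--
--     for j in list2:
--         frequency2[j] = frequency2.get(j, 0)+1
--
--     return frequency == frequency2
-- ===== SOURCE B (Python) =====
-- def check_same_frequency(lis1, list2):
--     need = {}
--     for x in lis1:
--         need[x] = need.get(x, 0) + 1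
--     for y in list2:
--         c = need.get(y, 0)
--         if c == 0:
--             return False
--         need[y] = c - 1
--     return all(v == 0 for v in need.values())
-- ===== Notes on version B (the rewrite author's own statement) =====
-- stated objective: alternative
-- what changed: B keeps a single frequency map built from lis1 and consumes it while scanning list2 (early exit on a missing/exhausted element, final all-zero check) instead of building two dicts and comparing them.
import Mathlib
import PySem

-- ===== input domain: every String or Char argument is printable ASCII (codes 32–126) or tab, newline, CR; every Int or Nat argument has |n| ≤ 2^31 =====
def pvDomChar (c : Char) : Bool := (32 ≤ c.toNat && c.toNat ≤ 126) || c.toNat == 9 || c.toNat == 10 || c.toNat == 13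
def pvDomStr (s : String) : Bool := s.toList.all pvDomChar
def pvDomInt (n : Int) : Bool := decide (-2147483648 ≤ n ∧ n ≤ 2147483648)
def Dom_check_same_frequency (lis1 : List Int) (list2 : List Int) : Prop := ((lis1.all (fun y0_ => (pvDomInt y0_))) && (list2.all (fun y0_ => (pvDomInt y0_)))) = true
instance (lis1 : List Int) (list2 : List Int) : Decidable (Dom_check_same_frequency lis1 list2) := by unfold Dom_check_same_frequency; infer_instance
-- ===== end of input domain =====

-- B consumes one frequency map over list2 (early exit, final all-zero check) instead of
-- building two frequency dicts and comparing them; objective: alternative decomposition, same cost.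

-- ===== PORT A =====
-- Python dict == ignores insertion order: ported as key-set equality plus value agreement on the
-- keys (getD k 0 equals the stored value whenever k is a key, so this is exact).
def check_same_frequency (lis1 : List Int) (list2 : List Int) : Bool :=
  let frequency := lis1.foldl (fun d i => d.insert i (d.getD i 0 + 1)) (PySem.Dict.empty : PySem.Dict Int Int)
  let frequency2 := list2.foldl (fun d j => d.insert j (d.getD j 0 + 1)) (PySem.Dict.empty : PySem.Dict Int Int)
  PySem.Set.equal frequency.keys frequency2.keys &&
    frequency.keys.all (fun k => frequency.getD k 0 == frequency2.getD k 0)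

-- ===== PORT B =====
def csfConsume (d : PySem.Dict Int Int) : List Int → Bool
  | [] => d.values.all (fun v => v == 0)
  | y :: ys =>
    let c := d.getD y 0
    if c == 0 then false else csfConsume (d.insert y (c - 1)) ys

def check_same_frequency_alt (lis1 : List Int) (list2 : List Int) : Bool :=
  csfConsume (lis1.foldl (fun d x => d.insert x (d.getD x 0 + 1)) PySem.Dict.empty) list2

-- ===== PRECONDITION & SPEC =====
def Spec_check_same_frequency (lis1 : List Int) (list2 : List Int) (out : Bool) : Prop := out = check_same_frequency_alt lis1 list2
instance (lis1 : List Int) (list2 : List Int) (out : Bool) : Decidable (Spec_check_same_frequency lis1 list2 out) := by unfold Spec_check_same_frequency; infer_instance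

-- ===== CLAIM (what is proved, stated in full; the proofs are below) =====
def Claim_equal_check_same_frequency : Prop := ∀ (lis1 : List Int) (list2 : List Int), Dom_check_same_frequency lis1 list2 → Spec_check_same_frequency lis1 list2 (check_same_frequency lis1 list2)

-- ===== LEMMAS AND PROOFS =====

-- B's loop succeeds iff the dict holds exactly the multiset of the remaining list.
theorem csfConsume_iff (ys : List Int) (d : PySem.Dict Int Int) (hnd : d.keys.Nodup) :
    csfConsume d ys = true ↔ ∀ k, d.getD k 0 = (ys.count k : Int) := by
  induction ys generalizing d with
  | nil =>
    simp only [csfConsume, List.count_nil, Nat.cast_zero]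
    rw [PySem.Dict.values_eq_map_keys d hnd 0]
    simp only [List.all_map, List.all_eq_true, Function.comp, beq_iff_eq]
    constructor
    · intro h k
      by_cases hk : k ∈ d.keys
      · exact h k hk
      · rw [PySem.Dict.getD_of_not_contains]
        rw [← Bool.not_eq_true, PySem.Dict.contains_iff_mem_keys]
        exact hk
    · intro h k _; exact h k
  | cons y ys ih =>
    simp only [csfConsume]
    by_cases hc : d.getD y 0 = 0
    · simp only [hc, beq_self_eq_true, if_true, Bool.false_eq_true, false_iff, not_forall]
      exact ⟨y, by rw [hc, List.count_cons_self]; push_cast; omega⟩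
    · rw [if_neg (by simp [hc])]
      have hnd' : (d.insert y (d.getD y 0 - 1)).keys.Nodup :=
        PySem.Dict.nodup_keys_insert _ _ _ hnd
      rw [ih _ hnd']
      constructor
      · intro h k
        have hk := h k
        rw [PySem.Dict.getD_insert] at hk
        rw [List.count_cons]
        simp only [beq_iff_eq]
        by_cases hky : k = y
        · subst hky
          rw [if_pos rfl] at hk
          push_cast
          split_ifs <;> omega
        · rw [if_neg hky] at hk
          push_cast
          split_ifs <;> omega
      · intro h k
        rw [PySem.Dict.getD_insert]
        have hk := h k
        rw [List.count_cons] at hk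
        simp only [beq_iff_eq] at hk
        push_cast at hk
        by_cases hky : k = y
        · subst hky
          rw [if_pos rfl]
          split_ifs at hk <;> omega
        · rw [if_neg hky]
          split_ifs at hk <;> omega

theorem alt_iff (lis1 list2 : List Int) :
    check_same_frequency_alt lis1 list2 = true ↔ ∀ k, lis1.count k = list2.count k := by
  unfold check_same_frequency_alt
  rw [PySem.Dict.foldl_insert_getD_add_one_eq_counter]
  rw [csfConsume_iff _ _ (PySem.Dict.nodup_keys_counter _)]
  constructor
  · intro h k; have := h k; rw [PySem.Dict.getD_counter] at this; exact_mod_cast this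
  · intro h k; rw [PySem.Dict.getD_counter]; exact_mod_cast h k

theorem a_iff (lis1 list2 : List Int) :
    check_same_frequency lis1 list2 = true ↔ ∀ k, lis1.count k = list2.count k := by
  have hA : check_same_frequency lis1 list2 =
      (PySem.Set.equal (lis1.foldl (fun d i => d.insert i (d.getD i 0 + 1)) (PySem.Dict.empty : PySem.Dict Int Int)).keys
          (list2.foldl (fun d j => d.insert j (d.getD j 0 + 1)) (PySem.Dict.empty : PySem.Dict Int Int)).keys &&
        (lis1.foldl (fun d i => d.insert i (d.getD i 0 + 1)) (PySem.Dict.empty : PySem.Dict Int Int)).keys.all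
          (fun k => (lis1.foldl (fun d i => d.insert i (d.getD i 0 + 1)) (PySem.Dict.empty : PySem.Dict Int Int)).getD k 0 ==
            (list2.foldl (fun d j => d.insert j (d.getD j 0 + 1)) (PySem.Dict.empty : PySem.Dict Int Int)).getD k 0)) := rfl
  rw [hA, PySem.Dict.foldl_insert_getD_add_one_eq_counter,
    PySem.Dict.foldl_insert_getD_add_one_eq_counter, Bool.and_eq_true, PySem.Set.equal_iff]
  simp only [PySem.Dict.keys_counter, PySem.Set.mem_ofList, List.all_eq_true,
    PySem.Dict.getD_counter, beq_iff_eq, Nat.cast_inj]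
  constructor
  · rintro ⟨hmem, hcnt⟩ k
    by_cases hk : k ∈ lis1
    · exact hcnt k hk
    · have hk2 : k ∉ list2 := fun h2 => hk ((hmem k).mpr h2)
      rw [List.count_eq_zero.mpr hk, List.count_eq_zero.mpr hk2]
  · intro h
    refine ⟨fun x => ?_, fun k _ => h k⟩
    constructor <;> intro hx
    · have := h x
      rw [← List.count_pos_iff] at hx ⊢
      omega
    · have := h x
      rw [← List.count_pos_iff] at hx ⊢
      omega

-- ===== VERDICT (by name: the statement is the Claim_ definition above) =====
theorem check_same_frequency_spec : Claim_equal_check_same_frequency := by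
  intro lis1 list2 _
  unfold Spec_check_same_frequency
  rw [Bool.eq_iff_iff, a_iff, alt_iff]
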